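-- pv_equiv track=rewrite | github.com/lactucis/magnetGPT | 4_generate_maps.py | revert_map_representation
-- ===== SOURCE A (Python) =====
-- def revert_map_representation(mangled_map_text):
--     """
--     모델 생성 결과물에 포함된 특수 토큰 표현 ('[P]', '[W]' 등)을
--     원래의 단일 문자 ('P', 'W' 등)로 변환합니다.
--
--     Args:
--         mangled_map_text (str): 모델이 생성한, 특수 토큰 표현을 포함하는 맵 텍스트입니다.
--
--     Returns:
--         str: 원래의 문자 표현으로 변환된 맵 텍스트입니다.
--     """
--     # 변환 규칙을 정의한 딕셔너리입니다.
--     revert_tile_map = {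
--         "[P]": "P", "[W]": "W", "[-]": "-",
--         "[T]": "T", "[G]": "G", "[O]": "O",
--     }
--     processed_map_text = mangled_map_text
--     # 정의된 규칙에 따라 모든 특수 토큰 표현을 원래 문자로 치환합니다.
--     for new_rep, original_char in revert_tile_map.items():
--         processed_map_text = processed_map_text.replace(new_rep, original_char)
--     return processed_map_text
-- ===== SOURCE B (Python) =====
-- def revert_map_representation(mangled_map_text):
--     tiles = "PW-TGO"
--     out = []
--     i = 0
--     n = len(mangled_map_text)
--     while i < n:
--         if mangled_map_text[i] == "[" and i + 2 < n and mangled_map_text[i + 1] in tiles and mangled_map_text[i + 2] == "]":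
--             out.append(mangled_map_text[i + 1])
--             i += 3
--         else:
--             out.append(mangled_map_text[i])
--             i += 1
--     return "".join(out)
-- ===== Notes on version B (the rewrite author's own statement) =====
-- stated objective: alternative
-- what changed: B replaces A's six sequential full-string str.replace passes by a single left-to-right scan that rewrites each bracketed tile token to its single tile character in one pass.
import Mathlib
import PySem

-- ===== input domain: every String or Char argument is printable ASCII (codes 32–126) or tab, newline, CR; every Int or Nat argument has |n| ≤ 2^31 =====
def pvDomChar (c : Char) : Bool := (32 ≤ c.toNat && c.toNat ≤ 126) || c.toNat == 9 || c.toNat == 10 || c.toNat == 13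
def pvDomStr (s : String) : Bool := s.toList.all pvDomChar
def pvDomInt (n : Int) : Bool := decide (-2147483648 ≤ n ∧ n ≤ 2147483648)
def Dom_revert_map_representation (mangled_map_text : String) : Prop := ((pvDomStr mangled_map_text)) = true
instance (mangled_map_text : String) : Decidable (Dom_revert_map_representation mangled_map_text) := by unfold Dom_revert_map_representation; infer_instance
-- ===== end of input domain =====

set_option maxRecDepth 8000
set_option maxHeartbeats 1000000


-- B replaces A's six sequential str.replace passes by one left-to-right scan that rewrites
-- every bracketed tile token in a single pass (alternative algorithm, same result).

-- ===== PORT A =====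
def revert_map_representation (mangled_map_text : String) : String :=
  let revert_tile_map : PySem.Dict String String :=
    PySem.Dict.ofList [("[P]", "P"), ("[W]", "W"), ("[-]", "-"), ("[T]", "T"), ("[G]", "G"), ("[O]", "O")]
  let processed_map_text := mangled_map_text
  revert_tile_map.items.foldl
    (fun processed_map_text kv => PySem.Str.replace processed_map_text kv.1 kv.2)
    processed_map_text

-- ===== PORT B =====
-- Source B's `tiles = "PW-TGO"`; `ch in tiles` for a single char is membership of that char
def pvTiles : List Char := "PW-TGO".toList

-- Source B's while-loop over the index, as recursion on the remaining suffix: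
-- a window "[t]" with t a tile char emits t and advances 3, otherwise emit one char and advance 1
def pvScanWith (tiles : List Char) (l : List Char) : List Char :=
  match l with
  | [] => []
  | [c] => [c]
  | [c, d] => [c, d]
  | c :: d :: e :: r =>
    if c = '[' ∧ d ∈ tiles ∧ e = ']' then d :: pvScanWith tiles r
    else c :: pvScanWith tiles (d :: e :: r)
termination_by l.length

def revert_map_representation_alt (mangled_map_text : String) : String :=
  String.ofList (pvScanWith pvTiles mangled_map_text.toList)

-- ===== PRECONDITION & SPEC =====
def Spec_revert_map_representation (mangled_map_text : String) (out : String) : Prop := out = revert_map_representation_alt mangled_map_text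
instance (mangled_map_text : String) (out : String) : Decidable (Spec_revert_map_representation mangled_map_text out) := by unfold Spec_revert_map_representation; infer_instance

-- ===== CLAIM (what is proved, stated in full; the proofs are below) =====
def Claim_equal_revert_map_representation : Prop := ∀ (mangled_map_text : String), Dom_revert_map_representation mangled_map_text → Spec_revert_map_representation mangled_map_text (revert_map_representation mangled_map_text)

-- ===== LEMMAS AND PROOFS =====

-- leftmost one-pass replacement of the single token "[x]" by "x" (what one str.replace pass does)
def repl1 (x : Char) (l : List Char) : List Char :=
  match l with
  | [] => []
  | c :: t => if c = '[' ∧ t.take 2 = [x, ']'] then x :: repl1 x (t.drop 2) else c :: repl1 x t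
termination_by l.length
decreasing_by
  all_goals simp

lemma repl1_nil (x : Char) : repl1 x [] = [] := by rw [repl1.eq_def]

lemma repl1_cons (x c : Char) (t : List Char) :
    repl1 x (c :: t) = if c = '[' ∧ t.take 2 = [x, ']'] then x :: repl1 x (t.drop 2) else c :: repl1 x t := by
  rw [repl1.eq_def]

lemma prefix_iff (x c : Char) (t : List Char) :
    (['[', x, ']'] : List Char).isPrefixOf (c :: t) = true ↔ (c = '[' ∧ t.take 2 = [x, ']']) := by
  rw [List.isPrefixOf_iff_prefix, List.prefix_iff_eq_take]
  cases t with
  | nil => simp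
  | cons d t2 =>
    cases t2 with
    | nil => simp
    | cons e t3 =>
      simp [List.take]
      constructor
      · rintro ⟨h1, h2, h3⟩; exact ⟨h1.symm, h2.symm, h3.symm⟩
      · rintro ⟨h1, h2, h3⟩; exact ⟨h1.symm, h2.symm, h3.symm⟩

lemma go_eq (x : Char) : ∀ (fuel : Nat) (l acc : List Char), l.length ≤ fuel →
    PySem.Chars.replace.go ['[', x, ']'] [x] fuel l acc = acc.reverse ++ repl1 x l := by
  intro fuel
  induction fuel with
  | zero =>
    intro l acc h
    have hl : l = [] := by cases l <;> simp_all
    subst hl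
    simp [PySem.Chars.replace.go, repl1_nil]
  | succ n ih =>
    intro l acc h
    cases l with
    | nil => simp [PySem.Chars.replace.go, repl1_nil]
    | cons c t =>
      rw [PySem.Chars.replace.go]
      by_cases hp : c = '[' ∧ t.take 2 = [x, ']']
      · rw [if_pos ((prefix_iff x c t).mpr hp)]
        have hlen : 2 ≤ t.length := by
          have h2 : (t.take 2).length = 2 := by rw [hp.2]; rfl
          simp at h2; omega
        have hdrop : List.drop (['[', x, ']'] : List Char).length (c :: t) = t.drop 2 := by
          simp
        rw [hdrop]
        rw [ih (t.drop 2) _ (by simp at h ⊢; omega)]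
        rw [repl1_cons, if_pos hp]
        simp
      · rw [if_neg (by rw [prefix_iff]; exact hp)]
        rw [ih t (c :: acc) (by simp at h; omega)]
        rw [repl1_cons, if_neg hp]
        simp

lemma replace_eq_repl1 (x : Char) (l : List Char) :
    PySem.Chars.replace l ['[', x, ']'] [x] = repl1 x l := by
  rw [PySem.Chars.replace]
  rw [if_neg (by simp)]
  simpa using go_eq x l.length l [] le_rfl

-- pvScanWith facts
lemma scan_nil_tiles (l : List Char) : pvScanWith [] l = l := by
  induction l using pvScanWith.induct [] with
  | case1 => simp [pvScanWith]
  | case2 c => simp [pvScanWith]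
  | case3 c d => simp [pvScanWith]
  | case4 c d e r h ih => simp at h
  | case5 c d e r h ih => rw [pvScanWith, if_neg h]; exact congrArg _ ih

lemma scan_cons_ne (S : List Char) (c : Char) (hc : c ≠ '[') (u : List Char) :
    pvScanWith S (c :: u) = c :: pvScanWith S u := by
  cases u with
  | nil => simp [pvScanWith]
  | cons d v =>
    cases v with
    | nil => simp [pvScanWith]
    | cons e r => rw [pvScanWith, if_neg (by rintro ⟨h, -⟩; exact hc h)]

lemma scan_head (S : List Char) (d : Char) (v : List Char) :
    ∃ h m, pvScanWith S (d :: v) = h :: m ∧ (h = d ∨ h ∈ S) := by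
  cases v with
  | nil => exact ⟨d, [], by simp [pvScanWith], Or.inl rfl⟩
  | cons e w =>
    cases w with
    | nil => exact ⟨d, [e], by simp [pvScanWith], Or.inl rfl⟩
    | cons f r =>
      by_cases hc : d = '[' ∧ e ∈ S ∧ f = ']'
      · exact ⟨e, _, by rw [pvScanWith, if_pos hc], Or.inr hc.2.1⟩
      · exact ⟨d, _, by rw [pvScanWith, if_neg hc], Or.inl rfl⟩

lemma repl1_scan (x : Char) (S : List Char) (hx1 : x ≠ '[') (hx2 : x ≠ ']') (hxS : x ∉ S)
    (hS : ∀ y ∈ S, y ≠ '[' ∧ y ≠ ']') :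
    ∀ (n : Nat) (l : List Char), l.length ≤ n →
      repl1 x (pvScanWith S l) = pvScanWith (x :: S) l := by
  intro n
  induction n with
  | zero =>
    intro l h
    have hl : l = [] := by cases l <;> simp_all
    subst hl; simp [pvScanWith, repl1_nil]
  | succ n ih =>
    intro l h
    match l with
    | [] => simp [pvScanWith, repl1_nil]
    | [c] => simp only [pvScanWith]; rw [repl1_cons, if_neg (by rintro ⟨-, h2⟩; simp [List.take] at h2), repl1_nil]
    | [c, d] =>
      simp only [pvScanWith]
      rw [repl1_cons, if_neg (by rintro ⟨-, h2⟩; simp [List.take] at h2)]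
      rw [repl1_cons, if_neg (by rintro ⟨-, h2⟩; simp [List.take] at h2)]
      rw [repl1_nil]
    | c :: d :: e :: r =>
      have hlr : r.length + 3 ≤ n + 1 := by simpa using h
      by_cases hA : c = '[' ∧ d ∈ S ∧ e = ']'
      · -- token of S: both scans take it, repl1 passes the emitted tile char through
        rw [pvScanWith, if_pos hA]
        rw [show pvScanWith (x :: S) (c :: d :: e :: r) = d :: pvScanWith (x :: S) r from by
          rw [pvScanWith, if_pos ⟨hA.1, List.mem_cons_of_mem x hA.2.1, hA.2.2⟩]]
        have hd : d ≠ '[' := (hS d hA.2.1).1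
        rw [repl1_cons, if_neg (by rintro ⟨hcc, -⟩; exact hd hcc)]
        rw [ih r (by omega)]
      · by_cases hB : c = '[' ∧ d = x ∧ e = ']'
        · -- token of x: the S-scan leaves it intact, repl1 rewrites it
          obtain ⟨hc, hd, he⟩ := hB
          subst hc; subst hd; subst he
          rw [pvScanWith, if_neg hA]
          rw [scan_cons_ne S d hx1, scan_cons_ne S ']' (by decide)]
          rw [repl1_cons, if_pos ⟨rfl, rfl⟩]
          simp only [List.drop]
          rw [ih r (by omega)]
          rw [pvScanWith, if_pos ⟨rfl, List.mem_cons_self .., rfl⟩]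
        · -- no token at this position for either scan
          rw [pvScanWith, if_neg hA]
          rw [show pvScanWith (x :: S) (c :: d :: e :: r) = c :: pvScanWith (x :: S) (d :: e :: r) from by
            rw [pvScanWith, if_neg (by
              rintro ⟨hc, hd, he⟩
              rcases List.mem_cons.mp hd with hdx | hdS
              · exact hB ⟨hc, hdx, he⟩
              · exact hA ⟨hc, hdS, he⟩)]]
          have htail : repl1 x (pvScanWith S (d :: e :: r)) = pvScanWith (x :: S) (d :: e :: r) :=
            ih (d :: e :: r) (by simp; omega)
          obtain ⟨h1, m1, hm, hcase⟩ := scan_head S d (e :: r)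
          rw [hm] at htail ⊢
          rw [repl1_cons, if_neg ?hcond, htail]
          case hcond =>
            rintro ⟨hc, htk⟩
            -- the S-scan of the tail would have to start with "x]"
            cases m1 with
            | nil => simp [List.take] at htk
            | cons a m2 =>
              have h12 : h1 = x ∧ a = ']' := by
                simpa [List.take] using htk
              obtain ⟨hh1, ha⟩ := h12
              rcases hcase with hd1 | hS1
              · -- head is d, so d = x; then the next scanned char must be ']' → e = ']' → "[x]" token, contra hB
                have hdx : d = x := hd1.symm.trans hh1
                rw [scan_cons_ne S d (by rw [hdx]; exact hx1)] at hm
                obtain ⟨h2, m3, hsc2, hcase2⟩ := scan_head S e r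
                rw [hsc2] at hm
                have he' : h2 = ']' := by
                  rw [hh1, ha] at hm
                  simp at hm
                  exact hm.2.1
                rcases hcase2 with he2 | heS
                · exact hB ⟨hc, hdx, he2.symm.trans he'⟩
                · exact (hS h2 heS).2 he'
              · exact hxS (hh1 ▸ hS1)

lemma scan_congr (S S' : List Char) (hmem : ∀ c, c ∈ S ↔ c ∈ S') :
    ∀ (n : Nat) (l : List Char), l.length ≤ n → pvScanWith S l = pvScanWith S' l := by
  intro n
  induction n with
  | zero =>
    intro l h
    have hl : l = [] := by cases l <;> simp_all
    subst hl; simp [pvScanWith]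
  | succ n ih =>
    intro l h
    match l with
    | [] => simp [pvScanWith]
    | [c] => simp [pvScanWith]
    | [c, d] => simp [pvScanWith]
    | c :: d :: e :: r =>
      have h3 : r.length + 3 ≤ n + 1 := by simpa using h
      by_cases hA : c = '[' ∧ d ∈ S ∧ e = ']'
      · rw [pvScanWith, if_pos hA, pvScanWith, if_pos ⟨hA.1, (hmem d).mp hA.2.1, hA.2.2⟩]
        rw [ih r (by omega)]
      · rw [pvScanWith, if_neg hA, pvScanWith, if_neg (by
          rintro ⟨hc, hd, he⟩; exact hA ⟨hc, (hmem d).mpr hd, he⟩)]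
        rw [ih (d :: e :: r) (by simp; omega)]

-- ===== VERDICT (by name: the statement is the Claim_ definition above) =====
theorem revert_map_representation_spec : Claim_equal_revert_map_representation := by
  unfold Claim_equal_revert_map_representation
  intro s _
  unfold Spec_revert_map_representation revert_map_representation revert_map_representation_alt
  have hitems : (PySem.Dict.ofList [("[P]", "P"), ("[W]", "W"), ("[-]", "-"), ("[T]", "T"), ("[G]", "G"), ("[O]", "O")] : PySem.Dict String String).items
      = [("[P]", "P"), ("[W]", "W"), ("[-]", "-"), ("[T]", "T"), ("[G]", "G"), ("[O]", "O")] := by decide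
  simp only [hitems, List.foldl]
  have hstep : ∀ (x : Char) (S : List Char) (old new : String),
      old.toList = ['[', x, ']'] → new.toList = [x] →
      x ≠ '[' → x ≠ ']' → x ∉ S → (∀ y ∈ S, y ≠ '[' ∧ y ≠ ']') →
      ∀ (t : String), t.toList = pvScanWith S s.toList →
      (PySem.Str.replace t old new).toList = pvScanWith (x :: S) s.toList := by
    intro x S old new hold hnew hx1 hx2 hxS hS t ht
    simp only [PySem.Str.replace, String.toList_ofList]
    rw [hold, hnew, ht, replace_eq_repl1]
    exact repl1_scan x S hx1 hx2 hxS hS s.toList.length _ le_rfl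
  have h0 : s.toList = pvScanWith [] s.toList := (scan_nil_tiles s.toList).symm
  have h1 := hstep 'P' [] "[P]" "P" rfl rfl (by decide) (by decide) (by decide) (by intro y hy; cases hy) s h0
  have h2 := hstep 'W' ['P'] "[W]" "W" rfl rfl (by decide) (by decide) (by decide) (by intro y hy; fin_cases hy <;> exact ⟨by decide, by decide⟩) _ h1
  have h3 := hstep '-' ['W', 'P'] "[-]" "-" rfl rfl (by decide) (by decide) (by decide) (by intro y hy; fin_cases hy <;> exact ⟨by decide, by decide⟩) _ h2
  have h4 := hstep 'T' ['-', 'W', 'P'] "[T]" "T" rfl rfl (by decide) (by decide) (by decide) (by intro y hy; fin_cases hy <;> exact ⟨by decide, by decide⟩) _ h3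
  have h5 := hstep 'G' ['T', '-', 'W', 'P'] "[G]" "G" rfl rfl (by decide) (by decide) (by decide) (by intro y hy; fin_cases hy <;> exact ⟨by decide, by decide⟩) _ h4
  have h6 := hstep 'O' ['G', 'T', '-', 'W', 'P'] "[O]" "O" rfl rfl (by decide) (by decide) (by decide) (by intro y hy; fin_cases hy <;> exact ⟨by decide, by decide⟩) _ h5
  have hT : pvTiles = ['P', 'W', '-', 'T', 'G', 'O'] := by decide
  have hfin : pvScanWith ['O', 'G', 'T', '-', 'W', 'P'] s.toList = pvScanWith pvTiles s.toList :=
    scan_congr _ _ (by intro c; rw [hT]; constructor <;> (intro h; fin_cases h <;> decide)) s.toList.length _ le_rfl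
  rw [← hfin, ← h6, String.ofList_toList]
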